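-- pv_equiv track=rewrite | github.com/ethanwilloner/ctf-writeups | tools/pattern.py | pattern_create
-- ===== SOURCE A (Python) =====
-- import string
--
-- def pattern_create(length):
--     pattern = ''
--     set1 = [x for x in string.ascii_uppercase]
--     set2 = [x for x in string.ascii_lowercase]
--     set3 = [str(x) for x in range(0,10)]
--     while True:
--         for i in set1:
--             for j in set2:
--                 for k in set3:
--                     if len(pattern) == length:
--                         return pattern
--                     pattern += i
--                     if len(pattern) == length:
--                         return pattern
--                     pattern += j
--                     if len(pattern) == length:
--                         return pattern
--                     pattern += k
--     return pattern
-- ===== SOURCE B (Python) =====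
-- import string
--
-- def pattern_create(length):
--     out = []
--     for n in range(length):
--         t = (n // 3) % 6760
--         p = n % 3
--         if p == 0:
--             out.append(string.ascii_uppercase[t // 260])
--         elif p == 1:
--             out.append(string.ascii_lowercase[(t // 10) % 26])
--         else:
--             out.append(string.digits[t % 10])
--     return ''.join(out)
-- ===== Notes on version B (the rewrite author's own statement) =====
-- stated objective: alternative
-- what changed: B computes each character directly from its index by a closed-form triple decoding (t=(n//3)%6760, pick among uppercase/lowercase/digit by n%3) in one pass over range(length), replacing A's unbounded while-True with three nested loops and four equality checks per triple; negative lengths, on which A loops forever, are outside Pre_.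
import Mathlib
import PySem

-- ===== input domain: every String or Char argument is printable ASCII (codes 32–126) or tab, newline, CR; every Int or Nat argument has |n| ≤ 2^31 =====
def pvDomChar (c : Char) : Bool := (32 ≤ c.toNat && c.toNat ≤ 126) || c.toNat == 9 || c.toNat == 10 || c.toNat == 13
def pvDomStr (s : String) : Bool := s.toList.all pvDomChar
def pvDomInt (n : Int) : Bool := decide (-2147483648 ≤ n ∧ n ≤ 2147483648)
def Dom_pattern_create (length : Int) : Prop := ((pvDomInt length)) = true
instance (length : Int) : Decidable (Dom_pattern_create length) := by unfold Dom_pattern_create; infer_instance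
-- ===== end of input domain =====

-- B replaces A's unbounded while-True with three nested loops by a closed-form
-- per-index character computation in one pass (alternative decomposition, same cost;
-- return-value equivalence only — neither version mutates its argument).

-- ===== PORT A =====
-- set1 / set2 / set3 from A, as literal character lists
def pvSet1 : List Char := "ABCDEFGHIJKLMNOPQRSTUVWXYZ".toList
def pvSet2 : List Char := "abcdefghijklmnopqrstuvwxyz".toList
def pvSet3 : List Char := "0123456789".toList

-- innermost `for k in set3` loop body with A's early returns (.error = `return pattern`)
def pvLoopK (length : Int) (i j : Char) (ks : List Char) (pat : List Char) :
    Except (List Char) (List Char) :=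
  match ks with
  | [] => .ok pat
  | k :: rest =>
    if (pat.length : Int) = length then .error pat else
    let pat1 := pat ++ [i]
    if (pat1.length : Int) = length then .error pat1 else
    let pat2 := pat1 ++ [j]
    if (pat2.length : Int) = length then .error pat2 else
    pvLoopK length i j rest (pat2 ++ [k])

-- `for j in set2` loop
def pvLoopJ (length : Int) (i : Char) (js : List Char) (pat : List Char) :
    Except (List Char) (List Char) :=
  match js with
  | [] => .ok pat
  | j :: rest =>
    match pvLoopK length i j pvSet3 pat with
    | .error p => .error p
    | .ok p => pvLoopJ length i rest p

-- `for i in set1` loop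
def pvLoopI (length : Int) (is : List Char) (pat : List Char) :
    Except (List Char) (List Char) :=
  match is with
  | [] => .ok pat
  | i :: rest =>
    match pvLoopJ length i pvSet2 pat with
    | .error p => .error p
    | .ok p => pvLoopI length rest p

-- `while True`; fuel only makes the loop total (under Pre_ it never runs out:
-- each cycle adds 20280 characters). Fuel 0 mirrors the unreachable final `return pattern`.
def pvWhile (fuel : Nat) (length : Int) (pat : List Char) : List Char :=
  match fuel with
  | 0 => pat
  | f + 1 =>
    match pvLoopI length pvSet1 pat with
    | .error p => p
    | .ok p => pvWhile f length p

def pattern_create (length : Int) : String :=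
  (pvWhile (length.toNat + 1) length []).asString

-- ===== PORT B =====
-- closed-form character at index n (Source B's loop body)
def pvAltChar (n : Nat) : Char :=
  let t := (n / 3) % 6760
  if n % 3 = 0 then pvSet1.getD (t / 260) 'A'
  else if n % 3 = 1 then pvSet2.getD ((t / 10) % 26) 'a'
  else pvSet3.getD (t % 10) '0'

def pattern_create_alt (length : Int) : String :=
  (((List.range length.toNat).map pvAltChar)).asString

-- ===== PRECONDITION & SPEC =====
-- Excludes exactly length < 0: there A's `len(pattern) == length` never holds and A loops forever (returns nothing).
def Pre_pattern_create (length : Int) : Prop := 0 ≤ length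
instance (length : Int) : Decidable (Pre_pattern_create length) := by unfold Pre_pattern_create; infer_instance
def pvWitness_pattern_create : Int := (7)
def Spec_pattern_create (length : Int) (out : String) : Prop := out = pattern_create_alt length
instance (length : Int) (out : String) : Decidable (Spec_pattern_create length out) := by unfold Spec_pattern_create; infer_instance

-- ===== CLAIM (what is proved, stated in full; the proofs are below) =====
def Claim_equal_pattern_create : Prop := ∀ (length : Int), Dom_pattern_create length → Pre_pattern_create length → Spec_pattern_create length (pattern_create length)

-- ===== LEMMAS AND PROOFS =====

-- the prefix of B's infinite pattern
def pvP (m : Nat) : List Char := (List.range m).map pvAltChar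

theorem pvP_length (m : Nat) : (pvP m).length = m := by
  simp [pvP]

theorem pvP_succ (m : Nat) : pvP (m + 1) = pvP m ++ [pvAltChar m] := by
  simp [pvP, List.range_succ]

theorem pvAltChar_period (n : Nat) : pvAltChar (n + 20280) = pvAltChar n := by
  unfold pvAltChar
  have h1 : (n + 20280) / 3 = n / 3 + 6760 := by omega
  have h2 : (n + 20280) % 3 = n % 3 := by omega
  have h3 : (n / 3 + 6760) % 6760 = (n / 3) % 6760 := by omega
  rw [h1, h2, h3]

theorem pvAltChar_mod (m n : Nat) (hm : m % 20280 = 0) :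
    pvAltChar (m + n) = pvAltChar n := by
  obtain ⟨q, rfl⟩ : ∃ q, m = 20280 * q := ⟨m / 20280, by omega⟩
  induction q with
  | zero => simp
  | succ k ih =>
    have : 20280 * (k + 1) + n = (20280 * k + n) + 20280 := by ring
    rw [this, pvAltChar_period]
    exact ih (by omega)

theorem pvAltChar_triple (a b d : Nat) (ha : a < 26) (hb : b < 26) (hd : d < 10) :
    pvAltChar (3 * (260 * a + 10 * b + d)) = pvSet1.getD a 'A' ∧
    pvAltChar (3 * (260 * a + 10 * b + d) + 1) = pvSet2.getD b 'a' ∧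
    pvAltChar (3 * (260 * a + 10 * b + d) + 2) = pvSet3.getD d '0' := by
  unfold pvAltChar
  refine ⟨?_, ?_, ?_⟩
  · have h0 : (3 * (260 * a + 10 * b + d)) % 3 = 0 := by omega
    have h1' : (260 * a + 10 * b + d) % 6760 / 260 = a := by omega
    simp [h0, h1']
  · have h0 : (3 * (260 * a + 10 * b + d) + 1) % 3 = 1 := by omega
    have h1 : (3 * (260 * a + 10 * b + d) + 1) / 3 % 6760 / 10 % 26 = b := by omega
    simp [h0, h1]
  · have h0 : (3 * (260 * a + 10 * b + d) + 2) % 3 = 2 := by omega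
    have h1 : (3 * (260 * a + 10 * b + d) + 2) / 3 % 6760 % 10 = d := by omega
    simp [h0, h1]

theorem pvSet3_drop (d : Nat) (hd : d < 10) :
    pvSet3.drop d = pvSet3.getD d '0' :: pvSet3.drop (d + 1) := by
  interval_cases d <;> rfl

theorem pvSet2_drop (b : Nat) (hb : b < 26) :
    pvSet2.drop b = pvSet2.getD b 'a' :: pvSet2.drop (b + 1) := by
  interval_cases b <;> rfl

theorem pvSet1_drop (a : Nat) (ha : a < 26) :
    pvSet1.drop a = pvSet1.getD a 'A' :: pvSet1.drop (a + 1) := by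
  interval_cases a <;> rfl

theorem pvLoopK_spec (L m a b : Nat) (hm : m % 20280 = 0) (ha : a < 26) (hb : b < 26) :
    ∀ (n d : Nat), d + n = 10 → m + 3 * (260 * a + 10 * b + d) ≤ L →
    pvLoopK (L : Int) (pvSet1.getD a 'A') (pvSet2.getD b 'a') (pvSet3.drop d)
      (pvP (m + 3 * (260 * a + 10 * b + d))) =
    (if L < m + 3 * (260 * a + 10 * b + 10) then .error (pvP L)
     else .ok (pvP (m + 3 * (260 * a + 10 * b + 10)))) := by
  intro n
  induction n with
  | zero =>
    intro d hdn hle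
    have hd : d = 10 := by omega
    subst hd
    rw [show pvSet3.drop 10 = ([] : List Char) from rfl]
    simp only [pvLoopK]
    rw [if_neg (by omega)]
  | succ k ih =>
    intro d hdn hle
    have hd : d < 10 := by omega
    obtain ⟨e1, e2, e3⟩ := pvAltChar_triple a b d ha hb hd
    set t := 260 * a + 10 * b + d with ht
    have hc1 : pvAltChar (m + 3 * t) = pvSet1.getD a 'A' := by
      rw [pvAltChar_mod m (3 * t) hm]; exact e1
    have hc2 : pvAltChar (m + 3 * t + 1) = pvSet2.getD b 'a' := by
      have e : m + 3 * t + 1 = m + (3 * t + 1) := by omega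
      rw [e, pvAltChar_mod m _ hm]; exact e2
    have hc3 : pvAltChar (m + 3 * t + 2) = pvSet3.getD d '0' := by
      have e : m + 3 * t + 2 = m + (3 * t + 2) := by omega
      rw [e, pvAltChar_mod m _ hm]; exact e3
    rw [pvSet3_drop d hd]
    simp only [pvLoopK]
    by_cases h1 : m + 3 * t = L
    · rw [if_pos (by rw [pvP_length]; exact_mod_cast h1), h1]
      rw [if_pos (by omega)]
    · rw [if_neg (by rw [pvP_length]; exact_mod_cast fun h => h1 (by exact_mod_cast h))]
      rw [← hc1, ← pvP_succ]
      by_cases h2 : m + 3 * t + 1 = L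
      · rw [if_pos (by rw [pvP_length]; exact_mod_cast h2), h2]
        rw [if_pos (by omega)]
      · rw [if_neg (by rw [pvP_length]; exact_mod_cast fun h => h2 (by exact_mod_cast h))]
        rw [← hc2, ← pvP_succ]
        have e12 : m + 3 * t + 1 + 1 = m + 3 * t + 2 := by omega
        rw [e12]
        by_cases h3 : m + 3 * t + 2 = L
        · rw [if_pos (by rw [pvP_length]; exact_mod_cast h3), h3]
          rw [if_pos (by omega)]
        · rw [if_neg (by rw [pvP_length]; exact_mod_cast fun h => h3 (by exact_mod_cast h))]
          rw [← hc3, ← pvP_succ]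
          have e23 : m + 3 * t + 2 + 1 = m + 3 * (260 * a + 10 * b + (d + 1)) := by omega
          rw [e23, hc1, hc2]
          exact ih (d + 1) (by omega) (by omega)

theorem pvLoopJ_spec (L m a : Nat) (hm : m % 20280 = 0) (ha : a < 26) :
    ∀ (n b : Nat), b + n = 26 → m + 3 * (260 * a + 10 * b) ≤ L →
    pvLoopJ (L : Int) (pvSet1.getD a 'A') (pvSet2.drop b)
      (pvP (m + 3 * (260 * a + 10 * b))) =
    (if L < m + 3 * (260 * (a + 1)) then .error (pvP L)
     else .ok (pvP (m + 3 * (260 * (a + 1))))) := by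
  intro n
  induction n with
  | zero =>
    intro b hbn hle
    have hb : b = 26 := by omega
    subst hb
    rw [show pvSet2.drop 26 = ([] : List Char) from rfl]
    simp only [pvLoopJ]
    rw [show m + 3 * (260 * a + 10 * 26) = m + 3 * (260 * (a + 1)) from by omega]
    rw [if_neg (by omega)]
  | succ k ih =>
    intro b hbn hle
    have hb : b < 26 := by omega
    rw [pvSet2_drop b hb]
    simp only [pvLoopJ]
    have hk0 := pvLoopK_spec L m a b hm ha hb 10 0 (by omega) (by omega)
    rw [show (pvSet3.drop 0) = pvSet3 from rfl] at hk0
    simp only [Nat.add_zero] at hk0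
    rw [hk0]
    by_cases hstop : L < m + 3 * (260 * a + 10 * b + 10)
    · rw [if_pos hstop, if_pos (by omega)]
    · rw [if_neg hstop]
      rw [show m + 3 * (260 * a + 10 * b + 10) = m + 3 * (260 * a + 10 * (b + 1)) from by omega]
      exact ih (b + 1) (by omega) (by omega)

set_option maxRecDepth 4000 in
theorem pvLoopI_spec (L m : Nat) (hm : m % 20280 = 0) :
    ∀ (n a : Nat), a + n = 26 → m + 3 * (260 * a) ≤ L →
    pvLoopI (L : Int) (pvSet1.drop a) (pvP (m + 3 * (260 * a))) =
    (if L < m + 20280 then .error (pvP L) else .ok (pvP (m + 20280))) := by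
  intro n
  induction n with
  | zero =>
    intro a han hle
    have ha : a = 26 := by omega
    subst ha
    rw [show pvSet1.drop 26 = ([] : List Char) from rfl]
    simp only [pvLoopI]
    rw [show m + 3 * (260 * 26) = m + 20280 from by omega]
    rw [if_neg (by omega)]
  | succ k ih =>
    intro a han hle
    have ha : a < 26 := by omega
    rw [pvSet1_drop a ha]
    simp only [pvLoopI]
    have hj := pvLoopJ_spec L m a hm ha 26 0 (by omega) (by omega)
    rw [show (pvSet2.drop 0) = pvSet2 from rfl] at hj
    simp only [Nat.mul_zero, Nat.add_zero] at hj
    rw [hj]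
    by_cases hstop : L < m + 3 * (260 * (a + 1))
    · rw [if_pos hstop, if_pos (by omega)]
    · rw [if_neg hstop]
      exact ih (a + 1) (by omega) (by omega)

theorem pvWhile_spec (L : Nat) :
    ∀ (fuel m : Nat), m % 20280 = 0 → m ≤ L → L < m + fuel * 20280 →
    pvWhile fuel (L : Int) (pvP m) = pvP L := by
  intro fuel
  induction fuel with
  | zero => intro m _ h1 h2; omega
  | succ f ih =>
    intro m hm h1 h2
    simp only [pvWhile]
    have hi := pvLoopI_spec L m hm 26 0 (by omega) (by omega)
    rw [show (pvSet1.drop 0) = pvSet1 from rfl] at hi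
    simp only [Nat.mul_zero, Nat.add_zero] at hi
    rw [hi]
    by_cases hstop : L < m + 20280
    · rw [if_pos hstop]
    · rw [if_neg hstop]
      exact ih (m + 20280) (by omega) (by omega) (by omega)

-- ===== VERDICT (by name: the statement is the Claim_ definition above) =====
theorem pattern_create_spec : Claim_equal_pattern_create := by
  intro length _ hpre
  unfold Spec_pattern_create pattern_create pattern_create_alt
  obtain ⟨n, rfl⟩ : ∃ n : Nat, length = (n : Int) :=
    ⟨length.toNat, (Int.toNat_of_nonneg hpre).symm⟩
  simp only [Int.toNat_natCast]
  rw [show ([] : List Char) = pvP 0 from rfl]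
  rw [pvWhile_spec n (n + 1) 0 (by omega) (by omega) (by omega)]
  rfl
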